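-- pv_equiv track=rewrite | github.com/r-jelly/program-solving | baekjoon/24542.py | solution
-- ===== SOURCE A (Python) =====
-- from typing import Dict, List
--
-- def dfs(graph, visited, start):
--     stack = [start]
--     count = 1
--
--     while stack:
--         cur_num = stack.pop()
--         for next_num in graph[cur_num]:
--             if visited[next_num]:
--                 continue
--
--             visited[next_num] = True
--             stack.append(next_num)
--             count += 1
--     return count
--
-- def solution(N: int, graph: Dict[int, List]):
--     visited = [False] * (N+1)
--     size = 1
--     for i in range(1, N+1):
--         if visited[i]:
--             continue
--
--         visited[i] = True
--         cur_size = dfs(graph, visited, i)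
--         size *= cur_size % 1000000007
--     return size % 1000000007
-- ===== SOURCE B (Python) =====
-- def solution(N, graph):
--     MOD = 1000000007
--     result = 1
--     for i in range(1, N + 1):
--         comp = {i}
--         frontier = [i]
--         while frontier:
--             new = []
--             for u in frontier:
--                 for v in graph[u]:
--                     if v not in comp:
--                         comp.add(v)
--                         new.append(v)
--             frontier = new
--         if min(comp) == i:
--             result *= len(comp) % MOD
--     return result % MOD
-- ===== Notes on version B (the rewrite author's own statement) =====
-- stated objective: alternative
-- what changed: Replaces the shared-visited DFS-stack sweep with per-node breadth-first set saturation: every node independently computes its whole component as a set and contributes its size exactly when it is the component's minimum element, so the mutable visited array, the explicit stack and the running counter all disappear.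
-- outside the precondition, e.g. on solution(3, {1: [], 2: [3], 3: [1]}): A returns 2, B returns 1; on solution(1, {1: [0], 0: [1]}): A returns 2, B returns 1
import Mathlib
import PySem

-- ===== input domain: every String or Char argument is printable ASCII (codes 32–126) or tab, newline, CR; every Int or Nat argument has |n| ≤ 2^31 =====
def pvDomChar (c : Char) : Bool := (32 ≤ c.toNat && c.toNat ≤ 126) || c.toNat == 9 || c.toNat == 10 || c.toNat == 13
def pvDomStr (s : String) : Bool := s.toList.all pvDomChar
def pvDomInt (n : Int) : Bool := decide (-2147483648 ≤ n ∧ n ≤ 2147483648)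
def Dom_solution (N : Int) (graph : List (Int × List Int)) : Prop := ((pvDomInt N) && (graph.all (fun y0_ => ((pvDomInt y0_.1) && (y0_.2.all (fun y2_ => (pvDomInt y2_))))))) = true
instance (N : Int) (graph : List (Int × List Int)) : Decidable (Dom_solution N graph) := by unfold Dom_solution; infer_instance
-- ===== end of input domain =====

-- B replaces A's shared-visited DFS sweep by independent per-node breadth-first set
-- saturation with a minimum-representative test (objective: alternative, not faster).
-- A mutates no argument observable by the caller (the visited list is local).

-- ===== PORT A =====
-- graph[u]: KeyError on a missing key is excluded by Pre_; modelled by the [] default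
def adjA (graph : List (Int × List Int)) (u : Int) : List Int :=
  ((PySem.Dict.mk graph).get? u).getD []

-- body of dfs's inner 'for next_num in graph[cur_num]' loop, state (visited, stack, count);
-- visited[next_num]: IndexError excluded by Pre_ (the 'true' default makes the port skip there)
def dfsStep (st : List Bool × List Int × Int) (next : Int) : List Bool × List Int × Int :=
  let (v, s, c) := st
  if (PySem.List.pyGet? v next).getD true then (v, s, c)
  else (PySem.List.pySetD v next true, s ++ [next], c + 1)

-- the 'while stack:' loop of dfs; fuel is a totality guard only (each iteration pops one
-- element and every push marks one unvisited cell, so iterations ≤ pushes + 1 ≤ len(visited) + 1)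
def dfsLoopA (graph : List (Int × List Int)) : Nat → List Bool → List Int → Int → List Bool × Int
  | 0, v, _, c => (v, c)
  | f + 1, v, s, c =>
      match PySem.List.pop? s (-1) with
      | none => (v, c)
      | some (cur, s') =>
          let r := (adjA graph cur).foldl dfsStep (v, s', c)
          dfsLoopA graph f r.1 r.2.1 r.2.2

-- def dfs(graph, visited, start); the mutated visited list is returned alongside count
def dfsA (graph : List (Int × List Int)) (visited : List Bool) (start : Int) : List Bool × Int :=
  dfsLoopA graph (visited.length + 2) visited [start] 1

-- body of solution's 'for i in range(1, N+1)' loop, state (visited, size)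
def solStepA (graph : List (Int × List Int)) (st : List Bool × Int) (i : Int) : List Bool × Int :=
  if (PySem.List.pyGet? st.1 i).getD true then st
  else
    let v1 := PySem.List.pySetD st.1 i true
    let r := dfsA graph v1 i
    (r.1, st.2 * PySem.Int.mod r.2 1000000007)

def solution (N : Int) (graph : List (Int × List Int)) : Int :=
  let st := (PySem.List.pyRange 1 (N + 1) 1).foldl (solStepA graph)
      (PySem.List.pyRepeat [false] (N + 1), 1)
  PySem.Int.mod st.2 1000000007

-- ===== PORT B =====
-- graph[u]: KeyError on a missing key is excluded by Pre_; modelled by the [] default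
def adjB (graph : List (Int × List Int)) (u : Int) : List Int :=
  ((PySem.Dict.mk graph).get? u).getD []

-- body of 'for v in graph[u]: if v not in comp: comp.add(v); new.append(v)', state (comp, new)
def bfsStep (st : PySem.Set Int × List Int) (v : Int) : PySem.Set Int × List Int :=
  if PySem.Set.contains st.1 v then st else (PySem.Set.add st.1 v, st.2 ++ [v])

-- one round of the 'while frontier:' loop: expand every frontier node's neighbours
def expandB (graph : List (Int × List Int)) (comp : PySem.Set Int) (frontier : List Int) :
    PySem.Set Int × List Int :=
  frontier.foldl (fun st u => (adjB graph u).foldl bfsStep st) (comp, [])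

-- the 'while frontier:' loop; fuel is a totality guard only (every round but the last
-- strictly enlarges comp, whose elements all come from i and the adjacency lists)
def satLoopB (graph : List (Int × List Int)) : Nat → PySem.Set Int → List Int → PySem.Set Int
  | _, comp, [] => comp
  | 0, comp, _ :: _ => comp
  | f + 1, comp, frontier@(_ :: _) =>
      let r := expandB graph comp frontier
      satLoopB graph f r.1 r.2

-- body of the 'for i in range(1, N+1)' loop of B, accumulator result
def solStepB (graph : List (Int × List Int)) (res : Int) (i : Int) : Int :=
  let comp := satLoopB graph ((graph.map (fun p => p.2.length)).sum + 2)
      (PySem.Set.add PySem.Set.empty i) [i]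
  if PySem.List.min? comp (fun x => x) = some i
  then res * PySem.Int.mod (PySem.List.len comp) 1000000007
  else res

def solution_alt (N : Int) (graph : List (Int × List Int)) : Int :=
  PySem.Int.mod ((PySem.List.pyRange 1 (N + 1) 1).foldl (solStepB graph) 1) 1000000007

-- ===== PRECONDITION & SPEC =====
-- first-match lookup of node u's adjacency list (used by Pre_ only)
def nbrs (graph : List (Int × List Int)) (u : Int) : List Int :=
  ((PySem.Dict.mk graph).get? u).getD []

-- Pre_ restricts to the task's natural domain, a well-formed undirected graph on nodes 1..N:
-- every node 1..N is a key, every neighbour lies in 1..N and carries the reverse edge.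
-- Outside it A raises KeyError/IndexError, silently wraps negative neighbours into the
-- visited list, or returns a value that depends on the accidental sweep order of its DFS.
-- (The leading size conjunct is implied by the key condition — N distinct keys need N
-- entries — and only makes the predicate evaluate fast for huge N.)
def Pre_solution (N : Int) (graph : List (Int × List Int)) : Prop :=
  N ≤ PySem.List.len graph ∧
  ∀ u ∈ PySem.List.pyRange 1 (N + 1) 1,
    ((PySem.Dict.mk graph).get? u).isSome = true ∧
    ∀ v ∈ nbrs graph u, (v ∈ PySem.List.pyRange 1 (N + 1) 1) ∧ u ∈ nbrs graph v

instance (N : Int) (graph : List (Int × List Int)) : Decidable (Pre_solution N graph) := by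
  unfold Pre_solution; infer_instance

def pvWitness_solution : Int × (List (Int × List Int)) := (2, [(1, [2]), (2, [1])])

def Spec_solution (N : Int) (graph : List (Int × List Int)) (out : Int) : Prop := out = solution_alt N graph
instance (N : Int) (graph : List (Int × List Int)) (out : Int) : Decidable (Spec_solution N graph out) := by unfold Spec_solution; infer_instance

-- ===== CLAIM (what is proved, stated in full; the proofs are below) =====
def Claim_equal_solution : Prop := ∀ (N : Int) (graph : List (Int × List Int)), Dom_solution N graph → Pre_solution N graph → Spec_solution N graph (solution N graph)

-- ===== LEMMAS AND PROOFS =====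

-- node x is a vertex
def inV (N x : Int) : Prop := 1 ≤ x ∧ x ≤ N

-- one edge step inside the vertex set
def Est (N : Int) (graph : List (Int × List Int)) (u v : Int) : Prop :=
  inV N u ∧ inV N v ∧ v ∈ nbrs graph u

-- connectivity: reflexive-transitive closure of edge steps
def Conn (N : Int) (graph : List (Int × List Int)) : Int → Int → Prop :=
  Relation.ReflTransGen (Est N graph)

lemma adjA_eq_nbrs : @adjA = @nbrs := rfl
lemma adjB_eq_nbrs : @adjB = @nbrs := rfl

lemma pre_nbrs_inV {N : Int} {graph : List (Int × List Int)} (hP : Pre_solution N graph)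
    {u v : Int} (hu : inV N u) (hv : v ∈ nbrs graph u) : inV N v := by
  obtain ⟨hu1, hu2⟩ := hu
  have := (hP.2 u (by simp [PySem.List.mem_pyRange_one]; omega)).2 v hv
  have := this.1; rw [PySem.List.mem_pyRange_one] at this; exact ⟨this.1, by omega⟩

lemma pre_sym {N : Int} {graph : List (Int × List Int)} (hP : Pre_solution N graph)
    {u v : Int} (hu : inV N u) (hv : v ∈ nbrs graph u) : u ∈ nbrs graph v := by
  obtain ⟨hu1, hu2⟩ := hu
  exact ((hP.2 u (by simp [PySem.List.mem_pyRange_one]; omega)).2 v hv).2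

lemma est_symm {N : Int} {graph : List (Int × List Int)} (hP : Pre_solution N graph) :
    Symmetric (Est N graph) := by
  intro u v ⟨h1, h2, h3⟩; exact ⟨h2, h1, pre_sym hP h1 h3⟩

lemma conn_symm {N : Int} {graph : List (Int × List Int)} (hP : Pre_solution N graph)
    {u v : Int} (h : Conn N graph u v) : Conn N graph v u :=
  Relation.ReflTransGen.symmetric (est_symm hP) h

lemma conn_trans {N : Int} {graph : List (Int × List Int)} {u v w : Int}
    (h1 : Conn N graph u v) (h2 : Conn N graph v w) : Conn N graph u w :=
  Relation.ReflTransGen.trans h1 h2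

lemma conn_step {N : Int} {graph : List (Int × List Int)} (hP : Pre_solution N graph)
    {u v : Int} (hu : inV N u) (hv : v ∈ nbrs graph u) : Conn N graph u v :=
  Relation.ReflTransGen.single ⟨hu, pre_nbrs_inV hP hu hv, hv⟩

-- any predicate holding at i and closed under neighbour steps covers the component of i
lemma mem_of_conn {N : Int} {graph : List (Int × List Int)} {i : Int} (P : Int → Prop)
    (hi : P i) (hcl : ∀ x, P x → ∀ y ∈ nbrs graph x, P y) :
    ∀ x, Conn N graph i x → P x := by
  intro x h
  induction h with
  | refl => exact hi
  | tail _ h2 ih => exact hcl _ ih _ h2.2.2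

-- reading visited[y]
lemma read_vis (v : List Bool) (y : Int) (h0 : 0 ≤ y) (h1 : y.toNat < v.length) :
    (PySem.List.pyGet? v y).getD true = v.getD y.toNat false := by
  rw [PySem.List.pyGet?_of_nonneg _ h0]
  simp [List.getD_eq_getElem?_getD, List.getElem?_eq_getElem h1]

lemma set_read (v : List Bool) (n : Nat) (b : Bool) (m : Nat) (hn : n < v.length) :
    (v.set n b).getD m false = if m = n then b else v.getD m false := by
  simp only [List.getD_eq_getElem?_getD, List.getElem?_set]
  by_cases h : n = m
  · subst h; simp [hn]
  · have h2 : m ≠ n := fun e => h e.symm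
    simp [h, h2, List.getD_eq_getElem?_getD]

lemma replicate_read (k m : Nat) : (List.replicate k false).getD m false = false := by
  rcases Nat.lt_or_ge m k with hm | hm
  · simp [List.getD_eq_getElem?_getD, List.getElem?_replicate, hm]
  · have hl2 : (List.replicate k (false : Bool)).length ≤ m := by simpa using hm
    simp [List.getD_eq_getElem?_getD, List.getElem?_eq_none_iff.2 hl2]

-- every neighbour value occurs in the flattened adjacency lists
lemma nbrs_subset_flat (graph : List (Int × List Int)) (u y : Int)
    (h : y ∈ nbrs graph u) : y ∈ graph.flatMap (fun p => p.2) := by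
  induction graph with
  | nil => simp [nbrs, PySem.Dict.get?] at h
  | cons p rest ih =>
    obtain ⟨k, l⟩ := p
    rw [nbrs, PySem.Dict.get?_mk_cons] at h
    by_cases hk : (k == u) = true
    · rw [if_pos hk] at h
      simp only [Option.getD_some] at h
      simp [h]
    · rw [if_neg hk] at h
      have := ih h
      simp only [List.flatMap_cons, List.mem_append]
      exact Or.inr this

-- marking invariant for A's dfs: visited = S0 ∪ D on vertices
def InvA (N : Int) (S0 D : Finset Int) (v : List Bool) : Prop :=
  v.length = (N + 1).toNat ∧
  ∀ x : Int, inV N x → ((v.getD x.toNat false = true) ↔ (x ∈ S0 ∨ x ∈ D))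

-- the discovered set D is sound for component i and avoids S0
def DOk (N : Int) (graph : List (Int × List Int)) (i : Int) (S0 D : Finset Int) : Prop :=
  ∀ x ∈ D, inV N x ∧ Conn N graph i x ∧ x ∉ S0

lemma dfsVisit_spec {N : Int} {graph : List (Int × List Int)} (hP : Pre_solution N graph)
    (i : Int) (S0 : Finset Int) :
    ∀ (ns : List Int) (v : List Bool) (s : List Int) (D : Finset Int),
      InvA N S0 D v → DOk N graph i S0 D →
      (∀ y ∈ ns, inV N y ∧ Conn N graph i y ∧ y ∉ S0) →
      ∃ (v' : List Bool) (news : List Int),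
        ns.foldl dfsStep (v, s, (D.card : Int)) = (v', s ++ news, ((D ∪ ns.toFinset).card : Int)) ∧
        InvA N S0 (D ∪ ns.toFinset) v' ∧ DOk N graph i S0 (D ∪ ns.toFinset) ∧
        news.Nodup ∧ (∀ y, y ∈ news ↔ y ∈ ns ∧ y ∉ D) := by
  intro ns
  induction ns with
  | nil =>
    intro v s D hInv hD _
    exact ⟨v, [], by simp, by simpa using hInv, by simpa using hD, by simp, by simp⟩
  | cons y ns ih =>
    intro v s D hInv hD hns
    have hy := hns y (by simp)
    have hys : ∀ z ∈ ns, inV N z ∧ Conn N graph i z ∧ z ∉ S0 :=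
      fun z hz => hns z (by simp [hz])
    obtain ⟨hyV, hyC, hyS⟩ := hy
    have hy0 : (0:Int) ≤ y := by have := hyV.1; omega
    have hlt : y.toNat < v.length := by
      rw [hInv.1]; have h1 := hyV.1; have h2 := hyV.2; omega
    have hread : (PySem.List.pyGet? v y).getD true = v.getD y.toNat false :=
      read_vis v y hy0 hlt
    simp only [List.foldl_cons]
    by_cases hmem : y ∈ D
    · have hvt : v.getD y.toNat false = true := (hInv.2 y hyV).2 (Or.inr hmem)
      have hvt' : v[y.toNat]?.getD false = true := by
        rw [← List.getD_eq_getElem?_getD]; exact hvt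
      have hstep : dfsStep (v, s, (D.card : Int)) y = (v, s, (D.card : Int)) := by
        simp [dfsStep, hread, hvt, hvt']
      rw [hstep]
      obtain ⟨v', news, heq, hInv', hD', hnd, hchar⟩ := ih v s D hInv hD hys
      have hset : D ∪ (y :: ns).toFinset = D ∪ ns.toFinset := by
        ext z; by_cases hzy : z = y <;> simp [List.toFinset_cons, hzy, hmem]
      refine ⟨v', news, ?_, ?_, ?_, hnd, ?_⟩
      · rw [heq, hset]
      · rw [hset]; exact hInv'
      · rw [hset]; exact hD'
      · intro z
        rw [hchar z]
        constructor
        · rintro ⟨h1, h2⟩; exact ⟨List.mem_cons_of_mem _ h1, h2⟩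
        · rintro ⟨h1, h2⟩
          rcases List.mem_cons.1 h1 with rfl | h1
          · exact absurd hmem h2
          · exact ⟨h1, h2⟩
    · have hvf : v.getD y.toNat false = false := by
        cases hb : v.getD y.toNat false
        · rfl
        · rcases (hInv.2 y hyV).1 hb with h | h
          · exact absurd h hyS
          · exact absurd h hmem
      have hstep : dfsStep (v, s, (D.card : Int)) y
          = (v.set y.toNat true, s ++ [y], (D.card : Int) + 1) := by
        have hvf' : v[y.toNat]?.getD false = false := by
          rw [← List.getD_eq_getElem?_getD]; exact hvf
        simp [dfsStep, hread, hvf, hvf', PySem.List.pySetD_of_nonneg _ _ hy0]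
      rw [hstep]
      have hInv1 : InvA N S0 (insert y D) (v.set y.toNat true) := by
        refine ⟨by simp [hInv.1], fun x hx => ?_⟩
        rw [set_read v y.toNat true x.toNat hlt]
        by_cases hxy : x = y
        · subst hxy; simp
        · have hne : x.toNat ≠ y.toNat := by
            have := hx.1; have := hyV.1; omega
          rw [if_neg hne, hInv.2 x hx]
          simp [Finset.mem_insert, hxy]
      have hD1 : DOk N graph i S0 (insert y D) := by
        intro x hx
        rcases Finset.mem_insert.1 hx with rfl | hx
        · exact ⟨hyV, hyC, hyS⟩
        · exact hD x hx
      have hcard : ((insert y D).card : Int) = (D.card : Int) + 1 := by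
        rw [Finset.card_insert_of_notMem hmem]; push_cast; ring
      obtain ⟨v', news, heq, hInv', hD', hnd, hchar⟩ :=
        ih (v.set y.toNat true) (s ++ [y]) (insert y D) hInv1 hD1 hys
      rw [hcard] at heq
      have hset : insert y D ∪ ns.toFinset = D ∪ (y :: ns).toFinset := by
        ext z; by_cases hzy : z = y <;> simp [List.toFinset_cons, hzy]
      have hy_not_news : y ∉ news := by
        intro h; exact ((hchar y).1 h).2 (Finset.mem_insert_self y D)
      refine ⟨v', y :: news, ?_, ?_, ?_, ?_, ?_⟩
      · rw [heq, hset, List.append_assoc]; simp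
      · rw [hset] at hInv'; exact hInv'
      · rw [hset] at hD'; exact hD'
      · exact List.nodup_cons.2 ⟨hy_not_news, hnd⟩
      · intro z
        by_cases hzy : z = y
        · subst hzy
          simp [hmem]
        · constructor
          · intro h
            rcases List.mem_cons.1 h with rfl | h
            · exact absurd rfl hzy
            · have := (hchar z).1 h
              refine ⟨List.mem_cons_of_mem _ this.1, fun hzd => this.2 ?_⟩
              exact Finset.mem_insert_of_mem hzd
          · rintro ⟨h1, h2⟩
            rcases List.mem_cons.1 h1 with rfl | h1
            · exact absurd rfl hzy
            · refine List.mem_cons_of_mem _ ((hchar z).2 ⟨h1, fun hzd => ?_⟩)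
              rcases Finset.mem_insert.1 hzd with rfl | hzd
              · exact hzy rfl
              · exact h2 hzd

lemma dfsLoopA_spec {N : Int} {graph : List (Int × List Int)} (hP : Pre_solution N graph)
    (i : Int) (S0 : Finset Int)
    (hS0sub : ∀ x ∈ S0, inV N x)
    (hS0cl : ∀ x ∈ S0, ∀ y ∈ nbrs graph x, y ∈ S0) (hiS0 : i ∉ S0) :
    ∀ (fuel : Nat) (v : List Bool) (s : List Int) (D : Finset Int),
      InvA N S0 D v → DOk N graph i S0 D → i ∈ D →
      s.Nodup → (∀ x ∈ s, x ∈ D) →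
      (∀ x ∈ D, x ∉ s → ∀ y ∈ nbrs graph x, y ∈ D) →
      s.length + (Finset.Icc (1:Int) N).card + 1 ≤ fuel + D.card + S0.card →
      ∃ (v' : List Bool) (D' : Finset Int),
        dfsLoopA graph fuel v s (D.card : Int) = (v', (D'.card : Int)) ∧
        InvA N S0 D' v' ∧
        (∀ x, x ∈ D' ↔ inV N x ∧ Conn N graph i x) := by
  intro fuel
  induction fuel with
  | zero =>
    intro v s D hInv hD hiD hnodup hstack hclosed hfuel
    exfalso
    have hDsub : D ⊆ Finset.Icc (1:Int) N := by
      intro x hx; have := (hD x hx).1; exact Finset.mem_Icc.2 ⟨this.1, this.2⟩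
    have hSsub : S0 ⊆ Finset.Icc (1:Int) N := by
      intro x hx; have := hS0sub x hx; exact Finset.mem_Icc.2 ⟨this.1, this.2⟩
    have hdisj : Disjoint D S0 := by
      rw [Finset.disjoint_left]; intro x hx; exact (hD x hx).2.2
    have h1 : (D ∪ S0).card = D.card + S0.card := Finset.card_union_of_disjoint hdisj
    have h2 : (D ∪ S0).card ≤ (Finset.Icc (1:Int) N).card :=
      Finset.card_le_card (Finset.union_subset hDsub hSsub)
    omega
  | succ f ih =>
    intro v s D hInv hD hiD hnodup hstack hclosed hfuel
    rcases List.eq_nil_or_concat s with rfl | ⟨t, x, rfl⟩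
    · have hres : dfsLoopA graph (f + 1) v [] ((D.card : Int)) = (v, (D.card : Int)) := by
        simp [dfsLoopA, PySem.List.pop?]
      refine ⟨v, D, hres, hInv, fun x => ⟨fun hx => ⟨(hD x hx).1, (hD x hx).2.1⟩, ?_⟩⟩
      rintro ⟨hxV, hxC⟩
      exact mem_of_conn (· ∈ D) hiD
        (fun z hz y hy => hclosed z hz (by simp) y hy) x hxC
    · simp only [List.concat_eq_append] at hnodup hstack hclosed hfuel ⊢
      have hxD : x ∈ D := hstack x (by simp)
      obtain ⟨hxV, hxC, hxS⟩ := hD x hxD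
      have hns : ∀ y ∈ nbrs graph x, inV N y ∧ Conn N graph i y ∧ y ∉ S0 := by
        intro y hy
        refine ⟨pre_nbrs_inV hP hxV hy, conn_trans hxC (conn_step hP hxV hy), fun hyS => ?_⟩
        exact hxS (hS0cl y hyS x (pre_sym hP hxV hy))
      obtain ⟨v2, news, heq, hInv2, hD2, hnd2, hchar2⟩ :=
        dfsVisit_spec hP i S0 (nbrs graph x) v t D hInv hD hns
      have htnodup : t.Nodup ∧ x ∉ t := by
        rw [List.nodup_append] at hnodup
        exact ⟨hnodup.1, fun hxt => hnodup.2.2 x hxt x (by simp) rfl⟩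
      have hstep : dfsLoopA graph (f + 1) v (t ++ [x]) ((D.card : Int))
          = dfsLoopA graph f v2 (t ++ news) (((D ∪ (nbrs graph x).toFinset).card : Int)) := by
        show (match PySem.List.pop? (t ++ [x]) (-1) with
          | none => (v, (D.card : Int))
          | some (cur, s') =>
              let r := (adjA graph cur).foldl dfsStep (v, s', (D.card : Int))
              dfsLoopA graph f r.1 r.2.1 r.2.2) = _
        rw [PySem.List.pop?_last]
        show (let r := (adjA graph x).foldl dfsStep (v, t, (D.card : Int))
              dfsLoopA graph f r.1 r.2.1 r.2.2) = _
        rw [adjA_eq_nbrs, heq]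
      rw [hstep]
      have hnews_fin : news.toFinset = (nbrs graph x).toFinset \ D := by
        ext z
        simp only [List.mem_toFinset, Finset.mem_sdiff]
        exact hchar2 z
      have hcard2 : (D ∪ (nbrs graph x).toFinset).card = D.card + news.length := by
        rw [← Finset.union_sdiff_self_eq_union, Finset.card_union_of_disjoint Finset.disjoint_sdiff,
          ← hnews_fin, List.toFinset_card_of_nodup hnd2]
      refine ih v2 (t ++ news) (D ∪ (nbrs graph x).toFinset) hInv2 hD2
        (Finset.mem_union_left _ hiD) ?_ ?_ ?_ ?_
      · rw [List.nodup_append]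
        refine ⟨htnodup.1, hnd2, fun z hzt w hwnews hzw => ?_⟩
        subst hzw
        exact ((hchar2 z).1 hwnews).2 (hstack z (by simp [hzt]))
      · intro z hz
        rcases List.mem_append.1 hz with hz | hz
        · exact Finset.mem_union_left _ (hstack z (by simp [hz]))
        · exact Finset.mem_union_right _ (List.mem_toFinset.2 ((hchar2 z).1 hz).1)
      · intro z hz hznot y hy
        rcases Finset.mem_union.1 hz with hzD | hzN
        · by_cases hzx : z = x
          · subst hzx
            exact Finset.mem_union_right _ (List.mem_toFinset.2 hy)
          · have hznotold : z ∉ t ++ [x] := by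
              intro hmem
              rcases List.mem_append.1 hmem with h | h
              · exact hznot (List.mem_append.2 (Or.inl h))
              · exact hzx (by simpa using h)
            exact Finset.mem_union_left _ (hclosed z hzD hznotold y hy)
        · by_cases hzD : z ∈ D
          · by_cases hzx : z = x
            · subst hzx
              exact Finset.mem_union_right _ (List.mem_toFinset.2 hy)
            · have hznotold : z ∉ t ++ [x] := by
                intro hmem
                rcases List.mem_append.1 hmem with h | h
                · exact hznot (List.mem_append.2 (Or.inl h))
                · exact hzx (by simpa using h)
              exact Finset.mem_union_left _ (hclosed z hzD hznotold y hy)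
          · exfalso
            exact hznot (by simp [(hchar2 z).2 ⟨List.mem_toFinset.1 hzN, hzD⟩])
      · have hslen : (t ++ [x]).length = t.length + 1 := by simp
        have hs2len : (t ++ news).length = t.length + news.length := by simp
        omega

-- B inner fold over one adjacency list
lemma bfs_fold_one (ns : List Int) :
    ∀ (c0 s1 : PySem.Set Int) (s2 : List Int), s1 = c0 ++ s2 → s1.Nodup →
      (ns.foldl bfsStep (s1, s2)).1 = c0 ++ (ns.foldl bfsStep (s1, s2)).2 ∧
      (ns.foldl bfsStep (s1, s2)).1.Nodup ∧
      (∀ y, y ∈ (ns.foldl bfsStep (s1, s2)).1 ↔ y ∈ s1 ∨ y ∈ ns) := by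
  induction ns with
  | nil => intro c0 s1 s2 hc hn; simpa using ⟨hc, hn⟩
  | cons v ns ih =>
    intro c0 s1 s2 hc hn
    simp only [List.foldl_cons]
    by_cases hv : v ∈ s1
    · have hb : PySem.Set.contains s1 v = true := (PySem.Set.contains_iff _ _).2 hv
      have hst : bfsStep (s1, s2) v = (s1, s2) := by unfold bfsStep; rw [hb]; simp
      rw [hst]
      obtain ⟨h1, h2, h3⟩ := ih c0 s1 s2 hc hn
      refine ⟨h1, h2, fun y => ?_⟩
      rw [h3 y]
      constructor
      · rintro (h | h)
        · exact Or.inl h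
        · exact Or.inr (List.mem_cons_of_mem _ h)
      · rintro (h | h)
        · exact Or.inl h
        · rcases List.mem_cons.1 h with rfl | h
          · exact Or.inl hv
          · exact Or.inr h
    · have hb : PySem.Set.contains s1 v = false := by
        cases hcv : PySem.Set.contains s1 v
        · rfl
        · exact absurd ((PySem.Set.contains_iff _ _).1 hcv) hv
      have hst : bfsStep (s1, s2) v = (s1 ++ [v], s2 ++ [v]) := by
        unfold bfsStep; rw [hb]; simp [PySem.Set.add_of_not_mem hv]
      rw [hst]
      have hc' : s1 ++ [v] = c0 ++ (s2 ++ [v]) := by rw [hc, List.append_assoc]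
      have hn' : (s1 ++ [v]).Nodup := by
        have := PySem.Set.nodup_add (s := s1) (x := v) hn
        rwa [PySem.Set.add_of_not_mem hv] at this
      obtain ⟨h1, h2, h3⟩ := ih c0 (s1 ++ [v]) (s2 ++ [v]) hc' hn'
      refine ⟨h1, h2, fun y => ?_⟩
      rw [h3 y]
      simp only [List.mem_append, List.mem_singleton, List.mem_cons]
      tauto

lemma expandB_spec (graph : List (Int × List Int)) (frontier : List Int) :
    ∀ (comp : PySem.Set Int), comp.Nodup →
      (expandB graph comp frontier).1 = comp ++ (expandB graph comp frontier).2 ∧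
      (expandB graph comp frontier).1.Nodup ∧
      (∀ y, y ∈ (expandB graph comp frontier).1 ↔
        y ∈ comp ∨ ∃ u ∈ frontier, y ∈ nbrs graph u) := by
  intro comp hnd
  unfold expandB
  suffices h : ∀ (s1 : PySem.Set Int) (s2 : List Int), s1 = comp ++ s2 → s1.Nodup →
      (frontier.foldl (fun st u => (adjB graph u).foldl bfsStep st) (s1, s2)).1 =
        comp ++ (frontier.foldl (fun st u => (adjB graph u).foldl bfsStep st) (s1, s2)).2 ∧
      (frontier.foldl (fun st u => (adjB graph u).foldl bfsStep st) (s1, s2)).1.Nodup ∧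
      (∀ y, y ∈ (frontier.foldl (fun st u => (adjB graph u).foldl bfsStep st) (s1, s2)).1 ↔
        y ∈ s1 ∨ ∃ u ∈ frontier, y ∈ nbrs graph u) by
    obtain ⟨h1, h2, h3⟩ := h comp [] (by simp) hnd
    exact ⟨h1, h2, fun y => by rw [h3 y]⟩
  induction frontier with
  | nil => intro s1 s2 hc hn; simpa using ⟨hc, hn⟩
  | cons u fr ih =>
    intro s1 s2 hc hn
    simp only [List.foldl_cons]
    obtain ⟨g1, g2, g3⟩ := bfs_fold_one (adjB graph u) comp s1 s2 hc hn
    obtain ⟨h1, h2, h3⟩ := ih _ _ g1 g2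
    refine ⟨h1, h2, fun y => ?_⟩
    rw [h3 y, g3 y]
    rw [adjB_eq_nbrs]
    simp only [List.mem_cons]
    constructor
    · rintro ((h | h) | ⟨w, hw, hw2⟩)
      · exact Or.inl h
      · exact Or.inr ⟨u, Or.inl rfl, h⟩
      · exact Or.inr ⟨w, Or.inr hw, hw2⟩
    · rintro (h | ⟨w, (rfl | hw), hw2⟩)
      · exact Or.inl (Or.inl h)
      · exact Or.inl (Or.inr hw2)
      · exact Or.inr ⟨w, hw, hw2⟩

lemma satLoopB_spec {N : Int} {graph : List (Int × List Int)} (hP : Pre_solution N graph)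
    (i : Int) :
    ∀ (fuel : Nat) (comp : PySem.Set Int) (frontier : List Int),
      comp.Nodup → i ∈ comp →
      (∀ x ∈ comp, inV N x ∧ Conn N graph i x) →
      (∀ x ∈ frontier, x ∈ comp) →
      (∀ x ∈ comp, x ∉ frontier → ∀ y ∈ nbrs graph x, y ∈ comp) →
      (∀ x ∈ comp, x = i ∨ x ∈ graph.flatMap (fun p => p.2)) →
      (graph.map (fun p => p.2.length)).sum + 3 ≤ fuel + comp.length →
      (satLoopB graph fuel comp frontier).Nodup ∧
      (∀ x, x ∈ satLoopB graph fuel comp frontier ↔ inV N x ∧ Conn N graph i x) := by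
  have hlenbound : ∀ (comp : PySem.Set Int), comp.Nodup →
      (∀ x ∈ comp, x = i ∨ x ∈ graph.flatMap (fun p => p.2)) →
      comp.length ≤ (graph.map (fun p => p.2.length)).sum + 1 := by
    intro comp hnd hsub
    have h1 : comp.length = comp.toFinset.card := (List.toFinset_card_of_nodup hnd).symm
    have h2 : comp.toFinset ⊆ (i :: graph.flatMap (fun p => p.2)).toFinset := by
      intro z hz
      rcases hsub z (List.mem_toFinset.1 hz) with rfl | hzf
      · simp
      · simp [hzf]
    have h3 := Finset.card_le_card h2
    have h4 := List.toFinset_card_le (i :: graph.flatMap (fun p => p.2))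
    have h5 : (graph.flatMap (fun p => p.2)).length = (graph.map (fun p => p.2.length)).sum := by
      rw [List.length_flatMap]
    simp only [List.length_cons] at h4
    omega
  have hdone : ∀ (comp : PySem.Set Int), comp.Nodup → i ∈ comp →
      (∀ x ∈ comp, inV N x ∧ Conn N graph i x) →
      (∀ x ∈ comp, ∀ y ∈ nbrs graph x, y ∈ comp) →
      comp.Nodup ∧ (∀ x, x ∈ comp ↔ inV N x ∧ Conn N graph i x) := by
    intro comp hnd hi hok hcl
    refine ⟨hnd, fun x => ⟨hok x, ?_⟩⟩
    rintro ⟨hxV, hxC⟩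
    exact mem_of_conn (· ∈ comp) hi hcl x hxC
  intro fuel
  induction fuel with
  | zero =>
    intro comp frontier hnd hi hok hfr hcl hsub hfuel
    cases frontier with
    | nil =>
      exact hdone comp hnd hi hok (fun x hx y hy => hcl x hx (by simp) y hy)
    | cons u fr =>
      exfalso
      have := hlenbound comp hnd hsub
      omega
  | succ f ih =>
    intro comp frontier hnd hi hok hfr hcl hsub hfuel
    cases frontier with
    | nil =>
      exact hdone comp hnd hi hok (fun x hx y hy => hcl x hx (by simp) y hy)
    | cons u fr =>
      obtain ⟨e1, e2, e3⟩ := expandB_spec graph (u :: fr) comp hnd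
      have hstep : satLoopB graph (f + 1) comp (u :: fr)
          = satLoopB graph f (expandB graph comp (u :: fr)).1 (expandB graph comp (u :: fr)).2 := by
        simp [satLoopB]
      rw [hstep]
      have hok2 : ∀ x ∈ (expandB graph comp (u :: fr)).1, inV N x ∧ Conn N graph i x := by
        intro x hx
        rcases (e3 x).1 hx with hx | ⟨u', hu', hx⟩
        · exact hok x hx
        · obtain ⟨hu'V, hu'C⟩ := hok u' (hfr u' hu')
          exact ⟨pre_nbrs_inV hP hu'V hx, conn_trans hu'C (conn_step hP hu'V hx)⟩
      have hsub2 : ∀ x ∈ (expandB graph comp (u :: fr)).1,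
          x = i ∨ x ∈ graph.flatMap (fun p => p.2) := by
        intro x hx
        rcases (e3 x).1 hx with hx | ⟨u', _, hx⟩
        · exact hsub x hx
        · exact Or.inr (nbrs_subset_flat graph u' x hx)
      have hcl2 : ∀ x ∈ (expandB graph comp (u :: fr)).1,
          x ∉ (expandB graph comp (u :: fr)).2 → ∀ y ∈ nbrs graph x,
          y ∈ (expandB graph comp (u :: fr)).1 := by
        intro x hx hxnot y hy
        have hxsplit : x ∈ comp ∨ x ∈ (expandB graph comp (u :: fr)).2 := by
          have := e1 ▸ hx
          exact List.mem_append.1 this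
        rcases hxsplit with hxc | hxn
        · by_cases hxf : x ∈ u :: fr
          · exact (e3 y).2 (Or.inr ⟨x, hxf, hy⟩)
          · exact (e3 y).2 (Or.inl (hcl x hxc hxf y hy))
        · exact absurd hxn hxnot
      cases hnew : (expandB graph comp (u :: fr)).2 with
      | nil =>
        have hceq : (expandB graph comp (u :: fr)).1 = comp := by
          rw [e1, hnew, List.append_nil]
        rw [hceq] at hok2 hcl2 ⊢
        have : satLoopB graph f comp ([] : List Int) = comp := by cases f <;> rfl
        rw [this]
        exact hdone comp hnd hi hok2 (fun x hx y hy => hcl2 x hx (by rw [hnew]; simp) y hy)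
      | cons w ws =>
        rw [← hnew]
        refine ih (expandB graph comp (u :: fr)).1 (expandB graph comp (u :: fr)).2
          e2 ((e3 i).2 (Or.inl hi)) hok2
          (fun x hx => e1 ▸ List.mem_append.2 (Or.inr hx)) hcl2 hsub2 ?_
        have hlen : (expandB graph comp (u :: fr)).1.length
            = comp.length + (expandB graph comp (u :: fr)).2.length := by
          rw [e1, List.length_append]
        have hpos : 0 < (expandB graph comp (u :: fr)).2.length := by
          rw [hnew]; simp
        omega

-- outer sweep: the two loop bodies keep equal accumulators
lemma outer_spec {N : Int} {graph : List (Int × List Int)} (hP : Pre_solution N graph) :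
    ∀ (n : Nat) (a : Int) (v : List Bool) (acc : Int),
      1 ≤ a → (N + 1 - a).toNat = n →
      v.length = (N + 1).toNat →
      (∃ S : Finset Int,
        (∀ x, x ∈ S ↔ inV N x ∧ ∃ j, 1 ≤ j ∧ j < a ∧ Conn N graph j x) ∧
        (∀ x, inV N x → ((v.getD x.toNat false = true) ↔ x ∈ S))) →
      ((PySem.List.pyRange a (N + 1) 1).foldl (solStepA graph) (v, acc)).2 =
        (PySem.List.pyRange a (N + 1) 1).foldl (solStepB graph) acc := by
  intro n
  induction n with
  | zero =>
    intro a v acc h1 hn _ _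
    rw [PySem.List.pyRange_one_eq_nil (by omega)]
    rfl
  | succ n ih =>
    intro a v acc h1 hn hlen hS
    obtain ⟨S, hSchar, hScoup⟩ := hS
    have haN : a ≤ N := by omega
    have haV : inV N a := ⟨h1, haN⟩
    have ha0 : (0:Int) ≤ a := by omega
    have halt : a.toNat < v.length := by rw [hlen]; omega
    have hreadA : (PySem.List.pyGet? v a).getD true = v.getD a.toNat false :=
      read_vis v a ha0 halt
    rw [PySem.List.pyRange_one_cons (by omega)]
    simp only [List.foldl_cons]
    -- the saturated component of a computed by B
    have hset0 : PySem.Set.add PySem.Set.empty a = [a] := by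
      rw [PySem.Set.add_of_not_mem (by simp [PySem.Set.empty])]
      rfl
    have hsat := satLoopB_spec hP a ((graph.map (fun p => p.2.length)).sum + 2) [a] [a]
      (by simp) (by simp) (fun x hx => by
        rw [List.mem_singleton] at hx
        subst hx
        exact ⟨haV, Relation.ReflTransGen.refl⟩)
      (fun x hx => hx) (fun x hx hnx => absurd hx hnx)
      (fun x hx => Or.inl (List.mem_singleton.1 hx)) (by simp)
    obtain ⟨hndC, hcharC⟩ := hsat
    have haC : a ∈ satLoopB graph ((graph.map (fun p => p.2.length)).sum + 2) [a] [a] :=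
      (hcharC a).2 ⟨haV, Relation.ReflTransGen.refl⟩
    by_cases hmark : a ∈ S
    · -- node already swept: both sides skip
      have hvt : v.getD a.toNat false = true := (hScoup a haV).2 hmark
      have hvt' : v[a.toNat]?.getD false = true := by
        rw [← List.getD_eq_getElem?_getD]; exact hvt
      have hstepA : solStepA graph (v, acc) a = (v, acc) := by
        simp [solStepA, hreadA, hvt, hvt']
      obtain ⟨_, j, hj1, hj2, hjC⟩ := (hSchar a).1 hmark
      have hjmem : j ∈ satLoopB graph ((graph.map (fun p => p.2.length)).sum + 2) [a] [a] :=
        (hcharC j).2 ⟨⟨hj1, by omega⟩, conn_symm hP hjC⟩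
      have hne : ¬ (PySem.List.min? (satLoopB graph ((graph.map (fun p => p.2.length)).sum + 2)
          [a] [a]) (fun x => x) = some a) := by
        intro hmq
        have := PySem.List.min?_isMin hmq j hjmem
        omega
      have hstepB : solStepB graph acc a = acc := by
        unfold solStepB
        rw [hset0, if_neg hne]
      rw [hstepA, hstepB]
      refine ih (a + 1) v acc (by omega) (by omega) hlen ⟨S, fun x => ?_, hScoup⟩
      constructor
      · intro hx
        obtain ⟨hxV, j0, hj01, hj02, hj0C⟩ := (hSchar x).1 hx
        exact ⟨hxV, j0, hj01, by omega, hj0C⟩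
      · rintro ⟨hxV, j0, hj01, hj02, hj0C⟩
        by_cases hj0a : j0 = a
        · subst hj0a
          exact (hSchar x).2 ⟨hxV, j, hj1, hj2, conn_trans hjC hj0C⟩
        · exact (hSchar x).2 ⟨hxV, j0, hj01, by omega, hj0C⟩
    · -- new component: A runs dfs, B's component passes the min test
      have hvf : v.getD a.toNat false = false := by
        cases hb : v.getD a.toNat false
        · rfl
        · exact absurd ((hScoup a haV).1 hb) hmark
      have hvf' : v[a.toNat]?.getD false = false := by
        rw [← List.getD_eq_getElem?_getD]; exact hvf
      have hIcc : (Finset.Icc (1:Int) N).card = N.toNat := by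
        rw [Int.card_Icc]; omega
      have hS0cl : ∀ x ∈ S, ∀ y ∈ nbrs graph x, y ∈ S := by
        intro x hx y hy
        obtain ⟨hxV, j0, hj01, hj02, hj0C⟩ := (hSchar x).1 hx
        exact (hSchar y).2 ⟨pre_nbrs_inV hP hxV hy, j0, hj01, hj02,
          conn_trans hj0C (conn_step hP hxV hy)⟩
      have hInv1 : InvA N S ({a} : Finset Int) (v.set a.toNat true) := by
        refine ⟨by simp [hlen], fun x hx => ?_⟩
        rw [set_read v a.toNat true x.toNat halt]
        by_cases hxa : x = a
        · subst hxa; simp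
        · have hne2 : x.toNat ≠ a.toNat := by
            have := hx.1; omega
          rw [if_neg hne2, hScoup x hx]
          simp [hxa]
      obtain ⟨v', D', heqA, hInv', hcharD⟩ :=
        dfsLoopA_spec hP a S (fun x hx => ((hSchar x).1 hx).1) hS0cl hmark
          ((v.set a.toNat true).length + 2) (v.set a.toNat true) [a] ({a} : Finset Int)
          hInv1
          (fun x hx => by
            rw [Finset.mem_singleton] at hx
            subst hx
            exact ⟨haV, Relation.ReflTransGen.refl, hmark⟩)
          (Finset.mem_singleton_self a)
          (by simp)
          (fun x hx => by rw [List.mem_singleton] at hx; subst hx; simp)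
          (fun x hx hnx => by
            rw [Finset.mem_singleton] at hx
            subst hx
            exact absurd (List.mem_singleton_self _) hnx)
          (by simp [hlen, hIcc]; omega)
      have hcard1 : ((({a} : Finset Int).card : Int)) = 1 := by simp
      rw [hcard1] at heqA
      have hstepA : solStepA graph (v, acc) a
          = (v', acc * PySem.Int.mod ((D'.card : Int)) 1000000007) := by
        unfold solStepA
        rw [hreadA, hvf]
        simp only [Bool.false_eq_true, if_false]
        unfold dfsA
        rw [PySem.List.pySetD_of_nonneg _ _ ha0, heqA]
      have hmq : PySem.List.min? (satLoopB graph ((graph.map (fun p => p.2.length)).sum + 2)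
          [a] [a]) (fun x => x) = some a := by
        obtain ⟨m, hm⟩ : ∃ m, PySem.List.min? (satLoopB graph
            ((graph.map (fun p => p.2.length)).sum + 2) [a] [a]) (fun x => x) = some m := by
          cases h : PySem.List.min? (satLoopB graph
              ((graph.map (fun p => p.2.length)).sum + 2) [a] [a]) (fun x => x) with
          | none =>
            rw [PySem.List.min?_eq_none_iff] at h
            rw [h] at haC
            exact absurd haC (by simp)
          | some m => exact ⟨m, rfl⟩
        have hmC := PySem.List.min?_mem hm
        have hma := PySem.List.min?_isMin hm a haC
        obtain ⟨⟨hm1, hm2⟩, hmaC⟩ := (hcharC m).1 hmC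
        have : m = a := by
          by_contra hne3
          exact hmark ((hSchar a).2 ⟨haV, m, hm1, by omega, conn_symm hP hmaC⟩)
        subst this; exact hm
      have hlenC : ((D'.card : Int)) = PySem.List.len
          (satLoopB graph ((graph.map (fun p => p.2.length)).sum + 2) [a] [a]) := by
        have hfin : (satLoopB graph ((graph.map (fun p => p.2.length)).sum + 2)
            [a] [a]).toFinset = D' := by
          ext z
          rw [List.mem_toFinset, hcharC z, hcharD z]
        rw [PySem.List.len_eq, ← List.toFinset_card_of_nodup hndC, hfin]
      have hstepB : solStepB graph acc a
          = acc * PySem.Int.mod ((D'.card : Int)) 1000000007 := by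
        unfold solStepB
        rw [hset0, if_pos hmq, hlenC]
      rw [hstepA, hstepB]
      refine ih (a + 1) v' (acc * PySem.Int.mod ((D'.card : Int)) 1000000007)
        (by omega) (by omega) hInv'.1 ⟨S ∪ D', fun x => ?_, fun x hx => ?_⟩
      · constructor
        · intro hx
          rcases Finset.mem_union.1 hx with hx | hx
          · obtain ⟨hxV, j0, hj01, hj02, hj0C⟩ := (hSchar x).1 hx
            exact ⟨hxV, j0, hj01, by omega, hj0C⟩
          · obtain ⟨hxV, hxC⟩ := (hcharD x).1 hx
            exact ⟨hxV, a, h1, by omega, hxC⟩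
        · rintro ⟨hxV, j0, hj01, hj02, hj0C⟩
          by_cases hj0a : j0 = a
          · subst hj0a
            exact Finset.mem_union_right _ ((hcharD x).2 ⟨hxV, hj0C⟩)
          · exact Finset.mem_union_left _ ((hSchar x).2 ⟨hxV, j0, hj01, by omega, hj0C⟩)
      · rw [hInv'.2 x hx, Finset.mem_union]

-- ===== VERDICT (by name: the statement is the Claim_ definition above) =====
theorem solution_spec : Claim_equal_solution := by
  intro N graph _ hP
  unfold Spec_solution solution solution_alt
  have h := outer_spec hP N.toNat 1 (PySem.List.pyRepeat [false] (N + 1)) 1 le_rfl (by omega)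
    (by rw [PySem.List.pyRepeat_singleton]; simp)
    ⟨∅, by
      intro x
      simp only [Finset.notMem_empty, false_iff]
      rintro ⟨_, j, hj1, hj2, _⟩
      omega,
      by intro x _; rw [PySem.List.pyRepeat_singleton, replicate_read]; simp⟩
  exact congrArg (fun z => PySem.Int.mod z 1000000007) h
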